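-- pv_equiv track=rewrite | github.com/sonuoffsec/ThreatLens | threatlens/ai_recon_assistant_pro.py | get_header_value
-- ===== SOURCE A (Python) =====
-- def get_header_value(headers, header_name):
--     """Extract header value"""
--     header_name_lower = header_name.lower()
--     for header in headers:
--         if ':' in header:
--             name, value = header.split(':', 1)
--             if name.strip().lower() == header_name_lower:
--                 return value.strip()
--     return None
-- ===== SOURCE B (Python) =====
-- def get_header_value(headers, header_name):
--     """Extract header value: build a case-insensitive index once, then look up."""
--     index = {}
--     for header in headers:
--         if ':' in header:
--             name, value = header.split(':', 1)
--             index.setdefault(name.strip().lower(), value.strip())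
--     return index.get(header_name.lower())
-- ===== Notes on version B (the rewrite author's own statement) =====
-- stated objective: alternative
-- what changed: Replaces A's early-returning scan with a build-index-then-lookup decomposition: one pass builds a dict keyed by lowercased stripped header name (setdefault keeps the first occurrence), then a single dict lookup answers the query.
import Mathlib
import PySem

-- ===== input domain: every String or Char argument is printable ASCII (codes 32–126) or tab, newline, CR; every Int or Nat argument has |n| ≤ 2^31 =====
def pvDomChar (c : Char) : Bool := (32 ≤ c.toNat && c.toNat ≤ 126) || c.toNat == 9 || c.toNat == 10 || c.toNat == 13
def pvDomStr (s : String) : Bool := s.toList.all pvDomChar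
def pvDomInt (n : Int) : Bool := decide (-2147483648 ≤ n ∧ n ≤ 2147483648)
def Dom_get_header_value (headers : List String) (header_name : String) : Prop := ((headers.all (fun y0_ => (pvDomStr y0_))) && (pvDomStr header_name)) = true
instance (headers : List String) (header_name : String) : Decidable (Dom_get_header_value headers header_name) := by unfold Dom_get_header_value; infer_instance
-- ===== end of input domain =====

-- ===== PORT A =====
-- B builds a first-occurrence-wins case-insensitive index once, then does one lookup (objective: alternative decomposition).
-- A-side helper: the early-returning scan, key already lowercased
def ghvScan (hnl : String) : List String → Option String
  | [] => none
  | header :: rest =>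
    if PySem.Str.isIn ":" header then
      match PySem.Str.splitMax? header ":" 1 with
      | some [name, value] =>
        if PySem.Str.lower (PySem.Str.strip name) == hnl then some (PySem.Str.strip value)
        else ghvScan hnl rest
      | _ => ghvScan hnl rest
    else ghvScan hnl rest

def get_header_value (headers : List String) (header_name : String) : Option String :=
  ghvScan (PySem.Str.lower header_name) headers

-- ===== PORT B =====
-- B-side helper: one loop step of the index build (setdefault = first occurrence wins)
def ghvStep (d : PySem.Dict String String) (header : String) : PySem.Dict String String :=
  if PySem.Str.isIn ":" header then
    match PySem.Str.splitMax? header ":" 1 with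
    | some [name, value] => d.setdefault (PySem.Str.lower (PySem.Str.strip name)) (PySem.Str.strip value)
    | _ => d
  else d

def get_header_value_alt (headers : List String) (header_name : String) : Option String :=
  let index := headers.foldl ghvStep (PySem.Dict.empty : PySem.Dict String String)
  index.get? (PySem.Str.lower header_name)

-- ===== PRECONDITION & SPEC =====
def Spec_get_header_value (headers : List String) (header_name : String) (out : Option String) : Prop := out = get_header_value_alt headers header_name
instance (headers : List String) (header_name : String) (out : Option String) : Decidable (Spec_get_header_value headers header_name out) := by unfold Spec_get_header_value; infer_instance

-- ===== CLAIM (what is proved, stated in full; the proofs are below) =====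
def Claim_equal_get_header_value : Prop := ∀ (headers : List String) (header_name : String), Dom_get_header_value headers header_name → Spec_get_header_value headers header_name (get_header_value headers header_name)

-- ===== LEMMAS AND PROOFS =====

-- Invariant: looking up k in the index built onto d is d's answer, else the scan's answer.
theorem ghv_fold_get (k : String) (hs : List String) (d : PySem.Dict String String) :
    (hs.foldl ghvStep d).get? k = (d.get? k).or (ghvScan k hs) := by
  induction hs generalizing d with
  | nil => simp only [List.foldl_nil, ghvScan]; exact Option.or_none.symm
  | cons h rest ih =>
    simp only [List.foldl_cons, ghvStep, ghvScan]
    split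
    · split
      · rename_i name value heq
        by_cases hk : PySem.Str.lower (PySem.Str.strip name) = k
        · subst hk
          rw [ih, PySem.Dict.get?_setdefault_self]
          cases d.get? (PySem.Str.lower (PySem.Str.strip name)) <;>
            simp [Option.or, Option.getD]
        · rw [ih, PySem.Dict.get?_setdefault_of_ne d _ (Ne.symm hk),
            beq_eq_false_iff_ne.mpr hk]
          simp
      · exact ih d
    · exact ih d

theorem ghv_eq (headers : List String) (header_name : String) :
    get_header_value headers header_name = get_header_value_alt headers header_name := by
  simp [get_header_value, get_header_value_alt, ghv_fold_get, PySem.Dict.get?_empty, Option.or]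

-- ===== VERDICT (by name: the statement is the Claim_ definition above) =====
theorem get_header_value_spec : Claim_equal_get_header_value := by
  intro headers header_name _
  unfold Spec_get_header_value
  exact ghv_eq headers header_name
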